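-- pv_equiv track=rewrite | github.com/ShagufthaSubedar/Python-Training | question14.py | toss_score
-- ===== SOURCE A (Python) =====
-- def toss_score(s):
--     score=0
--     head_count=0
--     for toss in s:
--         if toss=='H':
--             score+=2
--             head_count+=1
--             if head_count==3:
--                 break
--         else:
--             score-=1
--             head_count=0
--     return score
-- ===== SOURCE B (Python) =====
-- def toss_score(s):
--     i = s.find('HHH')
--     cut = len(s) if i == -1 else i + 3
--     prefix = s[:cut]
--     heads = sum(1 for c in prefix if c == 'H')
--     return 3 * heads - len(prefix)
-- ===== Notes on version B (the rewrite author's own statement) =====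
-- stated objective: alternative
-- what changed: Replaces the stateful fused loop (running score plus consecutive-head counter with break) by locate-then-tally: str.find locates the first run of three consecutive heads to get the cutoff, the prefix up to it is sliced, and the score is computed arithmetically as 3*heads - len(prefix).
import Mathlib
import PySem

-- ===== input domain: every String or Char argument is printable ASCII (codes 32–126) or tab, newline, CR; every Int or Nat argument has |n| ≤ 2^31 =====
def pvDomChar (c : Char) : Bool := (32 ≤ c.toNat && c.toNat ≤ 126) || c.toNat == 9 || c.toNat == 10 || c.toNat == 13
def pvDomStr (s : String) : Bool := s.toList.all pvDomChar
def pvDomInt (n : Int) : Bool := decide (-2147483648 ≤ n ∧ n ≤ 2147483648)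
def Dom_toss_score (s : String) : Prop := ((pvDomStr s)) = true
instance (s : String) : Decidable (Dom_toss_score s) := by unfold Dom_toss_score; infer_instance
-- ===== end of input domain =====

-- B replaces A's fused scoring loop (running score + consecutive-head counter with break)
-- by locate-then-tally: find the first "HHH" to get the cutoff, then score the prefix arithmetically.

-- ===== PORT A =====
-- the for-loop with `break`: state (score, head_count), early return when head_count hits 3
def tossLoopA : List Char → Int → Int → Int
  | [], score, _ => score
  | toss :: rest, score, head_count =>
    if toss = 'H' then
      let score := score + 2
      let head_count := head_count + 1
      if head_count = 3 then score else tossLoopA rest score head_count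
    else
      tossLoopA rest (score - 1) 0

def toss_score (s : String) : Int := tossLoopA s.toList 0 0

-- ===== PORT B =====
def toss_score_alt (s : String) : Int :=
  let i := PySem.Str.find s "HHH"
  let cut : Int := if i = -1 then PySem.Str.len s else i + 3
  let pfx := PySem.Str.slice s none (some cut)
  let heads : Int := pfx.toList.foldl (fun acc c => if c == 'H' then acc + 1 else acc) 0
  3 * heads - PySem.Str.len pfx

-- ===== PRECONDITION & SPEC =====
def Spec_toss_score (s : String) (out : Int) : Prop := out = toss_score_alt s
instance (s : String) (out : Int) : Decidable (Spec_toss_score s out) := by unfold Spec_toss_score; infer_instance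

-- ===== CLAIM (what is proved, stated in full; the proofs are below) =====
def Claim_equal_toss_score : Prop := ∀ (s : String), Dom_toss_score s → Spec_toss_score s (toss_score s)

-- ===== LEMMAS AND PROOFS =====

-- the index just past the point where A's loop stops, given the pending consecutive-head count
def cutA : List Char → Int → Nat
  | [], _ => 0
  | c :: r, hc => if c = 'H' then (if hc + 1 = 3 then 1 else cutA r (hc + 1) + 1) else cutA r 0 + 1

-- A's loop, characterised: final score = initial + 3·(heads in scanned prefix) − (scanned prefix length)
theorem tossLoopA_eq (l : List Char) : ∀ (score hc : Int),
    tossLoopA l score hc = score + 3 * ((l.take (cutA l hc)).count 'H' : Int) - (cutA l hc : Int) := by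
  induction l with
  | nil => intro score hc; simp [tossLoopA, cutA]
  | cons c r ih =>
    intro score hc
    by_cases hH : c = 'H'
    · subst hH
      by_cases h3 : hc + 1 = 3
      · simp [tossLoopA, cutA, h3]
        ring
      · simp [tossLoopA, cutA, h3, ih, List.take_succ_cons]
        ring
    · simp [tossLoopA, cutA, hH, ih, List.take_succ_cons]
      ring

theorem triple_prefix_iff (x : List Char) :
    (['H','H','H'] <+: x) ↔ ∃ t, x = 'H' :: 'H' :: 'H' :: t := by
  constructor
  · rintro ⟨t, ht⟩; exact ⟨t, ht.symm⟩
  · rintro ⟨t, rfl⟩; exact ⟨t, rfl⟩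

theorem triple_head {c : Char} {r : List Char} (h : ['H','H','H'] <+: c :: r) : c = 'H' := by
  rcases (triple_prefix_iff _).mp h with ⟨t, ht⟩
  injection ht with h1 _

theorem triple_second {a b : Char} {r : List Char} (h : ['H','H','H'] <+: a :: b :: r) : b = 'H' := by
  rcases (triple_prefix_iff _).mp h with ⟨t, ht⟩
  injection ht with _ h2
  injection h2 with h1 _

theorem triple_third {a b c : Char} {r : List Char} (h : ['H','H','H'] <+: a :: b :: c :: r) : c = 'H' := by
  rcases (triple_prefix_iff _).mp h with ⟨t, ht⟩
  injection ht with _ h2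
  injection h2 with _ h3
  injection h3 with h1 _

-- no occurrence of HHH ⇒ A's loop runs to the end of the string
theorem cutA_no_triple : ∀ (n : Nat) (l : List Char), l.length ≤ n →
    (∀ j, ¬ (['H','H','H'] <+: l.drop j)) → cutA l 0 = l.length := by
  intro n
  induction n with
  | zero =>
    intro l hl _
    have : l = [] := List.length_eq_zero_iff.mp (Nat.le_zero.mp hl)
    simp [this, cutA]
  | succ n ih =>
    intro l hl hno
    rcases l with _ | ⟨c0, t0⟩
    · simp [cutA]
    by_cases h0 : c0 = 'H'
    · subst h0
      rcases t0 with _ | ⟨c1, t1⟩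
      · simp [cutA]
      by_cases h1 : c1 = 'H'
      · subst h1
        rcases t1 with _ | ⟨c2, t2⟩
        · simp [cutA]
        by_cases h2 : c2 = 'H'
        · subst h2
          exact absurd (⟨t2, rfl⟩ : ['H','H','H'] <+: List.drop 0 ('H'::'H'::'H'::t2)) (hno 0)
        · have ht2 : cutA t2 0 = t2.length := by
            apply ih t2 (by simp at hl ⊢; omega)
            intro j
            have := hno (j + 3)
            simpa using this
          simp [cutA, h2, ht2]
      · have ht1 : cutA t1 0 = t1.length := by
          apply ih t1 (by simp at hl ⊢; omega)
          intro j
          have := hno (j + 2)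
          simpa using this
        simp [cutA, h1, ht1]
    · have ht0 : cutA t0 0 = t0.length := by
        apply ih t0 (by simp at hl ⊢; omega)
        intro j
        have := hno (j + 1)
        simpa using this
      simp [cutA, h0, ht0]

-- first occurrence of HHH at position j ⇒ A's loop stops right after its third head
theorem cutA_first_triple : ∀ (n : Nat) (l : List Char), l.length ≤ n → ∀ (j : Nat),
    (['H','H','H'] <+: l.drop j) → (∀ i, i < j → ¬ (['H','H','H'] <+: l.drop i)) →
    cutA l 0 = j + 3 := by
  intro n
  induction n with
  | zero =>
    intro l hl j hj _
    have hnil : l = [] := List.length_eq_zero_iff.mp (Nat.le_zero.mp hl)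
    subst hnil
    have h3 := hj.length_le
    simp only [List.length_drop, List.length_cons, List.length_nil] at h3
    omega
  | succ n ih =>
    intro l hl j hj hmin
    rcases l with _ | ⟨c0, t0⟩
    · have h3 := hj.length_le
      simp only [List.length_drop, List.length_cons, List.length_nil] at h3
      omega
    by_cases h0 : c0 = 'H'
    · subst h0
      rcases t0 with _ | ⟨c1, t1⟩
      · have h3 := hj.length_le
        simp only [List.length_drop, List.length_cons, List.length_nil] at h3
        omega
      by_cases h1 : c1 = 'H'
      · subst h1
        rcases t1 with _ | ⟨c2, t2⟩
        · have h3 := hj.length_le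
          simp only [List.length_drop, List.length_cons, List.length_nil] at h3
          omega
        by_cases h2 : c2 = 'H'
        · subst h2
          -- triple at 0; minimality forces j = 0
          have hj0 : j = 0 := by
            by_contra h
            exact hmin 0 (by omega) ⟨t2, rfl⟩
          subst hj0
          simp [cutA]
        · -- first three chars are H,H,non-H: j ≥ 3
          have hj3 : 3 ≤ j := by
            rcases Nat.lt_or_ge j 3 with h | h
            · interval_cases j
              · exact absurd (triple_third hj) h2
              · exact absurd (triple_second (show ['H','H','H'] <+: 'H'::c2::t2 from hj)) h2
              · exact absurd (triple_head (show ['H','H','H'] <+: c2::t2 from hj)) h2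
            · exact h
          obtain ⟨k, rfl⟩ := Nat.exists_eq_add_of_le hj3
          have ht2 : cutA t2 0 = k + 3 := by
            apply ih t2 (by simp at hl ⊢; omega) k
            · simpa [Nat.add_comm 3 k] using hj
            · intro i hi
              have := hmin (i + 3) (by omega)
              simpa using this
          simp [cutA, h2, ht2]
          omega
      · -- chars H, non-H: j ≥ 2
        have hj2 : 2 ≤ j := by
          rcases Nat.lt_or_ge j 2 with h | h
          · interval_cases j
            · exact absurd (triple_second hj) h1
            · exact absurd (triple_head (show ['H','H','H'] <+: c1::t1 from hj)) h1
          · exact h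
        obtain ⟨k, rfl⟩ := Nat.exists_eq_add_of_le hj2
        have ht1 : cutA t1 0 = k + 3 := by
          apply ih t1 (by simp at hl ⊢; omega) k
          · simpa [Nat.add_comm 2 k] using hj
          · intro i hi
            have := hmin (i + 2) (by omega)
            simpa using this
        simp [cutA, h1, ht1]
        omega
    · -- first char is not H: j ≥ 1
      have hj1 : 1 ≤ j := by
        rcases Nat.lt_or_ge j 1 with h | h
        · interval_cases j
          exact absurd (triple_head hj) h0
        · exact h
      obtain ⟨k, rfl⟩ := Nat.exists_eq_add_of_le hj1
      have ht0 : cutA t0 0 = k + 3 := by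
        apply ih t0 (by simp at hl ⊢; omega) k
        · simpa [Nat.add_comm 1 k] using hj
        · intro i hi
          have := hmin (i + 1) (by omega)
          simpa using this
      simp [cutA, h0, ht0]
      omega

-- ===== VERDICT (by name: the statement is the Claim_ definition above) =====
theorem toss_score_spec : Claim_equal_toss_score := by
  intro s _
  unfold Spec_toss_score
  simp only [toss_score, toss_score_alt]
  set l := s.toList with hls
  have hsub : "HHH".toList = ['H','H','H'] := by decide
  have hfind : PySem.Str.find s "HHH" = PySem.Chars.find l ['H','H','H'] := by
    simp [hls, hsub]
  rw [tossLoopA_eq, hfind]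
  by_cases hneg : PySem.Chars.find l ['H','H','H'] = -1
  · -- no occurrence: whole string scanned
    have hnone : ∀ j, ¬ (['H','H','H'] <+: l.drop j) := by
      intro j hpre
      exact ((PySem.Chars.find_eq_neg_one_iff l _).mp hneg)
        (hpre.isInfix.trans (List.drop_suffix j l).isInfix)
    have hcut : cutA l 0 = l.length := cutA_no_triple l.length l le_rfl hnone
    rw [if_pos hneg, PySem.Str.len_eq, ← hls]
    have hsl : (PySem.Str.slice s none (some (l.length : Int))).toList = l := by
      rw [PySem.Str.toList_slice, PySem.Chars.slice_eq_listSlice, ← hls,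
        PySem.List.slice_to l (by omega)]
      simp
    rw [PySem.Str.len_eq, hsl, PySem.List.foldl_beq_add_one, hcut]
    simp [List.take_length]
  · -- occurrence at position find ≥ 0
    set f := PySem.Chars.find l ['H','H','H'] with hf
    have hge : 0 ≤ f := by
      have := PySem.Chars.neg_one_le_find l ['H','H','H']
      rw [← hf] at this
      omega
    obtain ⟨hpre, hmin⟩ := PySem.Chars.find_spec (s := l) (sub := ['H','H','H']) hge
    have hcut : cutA l 0 = f.toNat + 3 :=
      cutA_first_triple l.length l le_rfl f.toNat hpre hmin
    have hlen : f.toNat + 3 ≤ l.length := by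
      have h1 := hpre.length_le
      have h2 := PySem.Chars.find_le_length l ['H','H','H']
      simp only [List.length_drop] at h1
      simp only [List.length_cons, List.length_nil] at h1
      omega
    rw [if_neg hneg]
    have hsl : (PySem.Str.slice s none (some (f + 3))).toList = l.take (f.toNat + 3) := by
      rw [PySem.Str.toList_slice, PySem.Chars.slice_eq_listSlice, ← hls,
        PySem.List.slice_to l (by omega)]
      congr 1
      omega
    rw [PySem.Str.len_eq, hsl, PySem.List.foldl_beq_add_one, hcut]
    rw [List.length_take, Nat.min_eq_left hlen]
    push_cast
    ring
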